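-- pv_equiv track=rewrite | github.com/sgpthomas/aws-automation | merge.py | sortCSVString
-- ===== SOURCE A (Python) =====
-- def sortCSVString(string):
--     if string == "": return ""
--     tuplify = lambda s: tuple(s.split('='))
--     newD = dict(sorted(map(tuplify, string.split(',')), key=lambda x: x[0]))
--     res = []
--     for k, v in newD.items():
--         res.append('{}={}'.format(k, v))
--     return ','.join(res)
-- ===== SOURCE B (Python) =====
-- def sortCSVString(string):
--     if string == "":
--         return ""
--     # association list kept strictly sorted by key at all times; no dict, no sort call
--     items = []
--     for pair in string.split(','):
--         k, v = pair.split('=')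
--         i = 0
--         while i < len(items) and items[i][0] < k:
--             i += 1
--         if i < len(items) and items[i][0] == k:
--             items[i] = (k, v)      # later value for a duplicate key wins
--         else:
--             items.insert(i, (k, v))
--     return ','.join(k + '=' + v for k, v in items)
-- ===== Notes on version B (the rewrite author's own statement) =====
-- stated objective: alternative
-- what changed: B never builds a dict and never calls sorted(): it maintains a single strictly key-sorted association list online, inserting each parsed pair at its position (replacing an existing entry with the same key, so the last value wins), then joins once; A sorts all raw tuples first, builds a dict and formats via an explicit loop.
import Mathlib
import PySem

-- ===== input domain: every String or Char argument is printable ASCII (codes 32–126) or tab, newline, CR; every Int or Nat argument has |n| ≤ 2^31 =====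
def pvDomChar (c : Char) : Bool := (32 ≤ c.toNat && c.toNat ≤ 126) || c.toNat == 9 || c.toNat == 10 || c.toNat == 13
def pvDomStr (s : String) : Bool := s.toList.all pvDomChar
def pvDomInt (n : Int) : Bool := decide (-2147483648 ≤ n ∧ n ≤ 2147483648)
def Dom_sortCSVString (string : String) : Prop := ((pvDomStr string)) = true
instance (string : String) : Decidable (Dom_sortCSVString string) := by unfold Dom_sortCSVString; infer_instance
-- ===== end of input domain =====

-- B keeps one strictly key-sorted association list, inserting each parsed pair in place
-- (replace on equal key, so the last value wins) — no dict, no sort call; objective: alternative.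

-- ===== PORT A =====
-- tuplify = lambda s: tuple(s.split('=')): the Python tuple is represented by its first two
-- components; exact under Pre_ (each piece holds exactly one '=', so the tuple has length 2).
def pvTuplify (s : String) : String × String :=
  let parts := (PySem.Str.split? s "=").getD []
  (parts.getD 0 "", parts.getD 1 "")

def sortCSVString (string : String) : String :=
  if string = "" then "" else
    -- newD = dict(sorted(map(tuplify, string.split(',')), key=lambda x: x[0]))
    let newD := PySem.Dict.ofList
      (PySem.List.sorted (((PySem.Str.split? string ",").getD []).map pvTuplify) (fun x => x.1))
    -- for k, v in newD.items(): res.append('{}={}'.format(k, v))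
    let res := newD.items.foldl (fun acc kv => acc ++ [kv.1 ++ "=" ++ kv.2]) []
    PySem.Str.join "," res

-- ===== PORT B =====
-- the while-scan of Source B: walk past smaller keys, replace on equal key, else insert here
def pvInsertSorted (k v : String) : List (String × String) → List (String × String)
  | [] => [(k, v)]
  | a :: t =>
    if a.1 < k then a :: pvInsertSorted k v t
    else if a.1 = k then (k, v) :: t
    else (k, v) :: a :: t

def sortCSVString_alt (string : String) : String :=
  if string = "" then "" else
    let items := ((PySem.Str.split? string ",").getD []).foldl
      (fun (items : List (String × String)) pair =>
        match (PySem.Str.split? pair "=").getD [] with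
        | [k, v] => pvInsertSorted k v items   -- k, v = pair.split('='); sorted insert
        | _ => items)                          -- Python raises ValueError here (excluded by Pre_)
      []
    PySem.Str.join "," (items.map (fun kv => kv.1 ++ "=" ++ kv.2))

-- ===== PRECONDITION & SPEC =====
-- Pre_ excludes exactly the inputs on which A raises ValueError (a comma-separated piece with
-- zero or several '='); B raises the same exception there.
def Pre_sortCSVString (string : String) : Prop :=
  string = "" ∨
    ∀ p ∈ (PySem.Str.split? string ",").getD [],
      ((PySem.Str.split? p "=").getD []).length = 2
instance (string : String) : Decidable (Pre_sortCSVString string) := by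
  unfold Pre_sortCSVString; infer_instance
def pvWitness_sortCSVString : String := "b=2,a=1,b=3"

def Spec_sortCSVString (string : String) (out : String) : Prop := out = sortCSVString_alt string
instance (string : String) (out : String) : Decidable (Spec_sortCSVString string out) := by unfold Spec_sortCSVString; infer_instance

-- ===== CLAIM (what is proved, stated in full; the proofs are below) =====
def Claim_equal_sortCSVString : Prop := ∀ (string : String), Dom_sortCSVString string → Pre_sortCSVString string → Spec_sortCSVString string (sortCSVString string)

-- ===== LEMMAS AND PROOFS =====

-- Under Pre_, B's parsing loop is the fold of pvInsertSorted over the pairs A builds.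
theorem foldl_match_eq_foldl_insertSorted (pieces : List String)
    (d : List (String × String))
    (h : ∀ p ∈ pieces, ((PySem.Str.split? p "=").getD []).length = 2) :
    pieces.foldl
      (fun (items : List (String × String)) pair =>
        match (PySem.Str.split? pair "=").getD [] with
        | [k, v] => pvInsertSorted k v items
        | _ => items) d
    = (pieces.map pvTuplify).foldl (fun acc p => pvInsertSorted p.1 p.2 acc) d := by
  induction pieces generalizing d with
  | nil => rfl
  | cons p t ih =>
    have hp := h p (List.mem_cons_self ..)
    obtain ⟨a, b, hab⟩ : ∃ a b, (PySem.Str.split? p "=").getD [] = [a, b] := by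
      rcases hl : (PySem.Str.split? p "=").getD [] with _ | ⟨a, _ | ⟨b, _ | _⟩⟩ <;>
        simp [hl] at hp ⊢
    simp only [List.foldl_cons, List.map_cons, hab, pvTuplify, List.getD_cons_zero,
      List.getD_cons_succ]
    exact ih _ (fun q hq => h q (List.mem_cons_of_mem _ hq))

-- first-match lookup through one sorted insertion (no sortedness hypothesis needed)
theorem find?_insertSorted (k v k' : String) (acc : List (String × String)) :
    (pvInsertSorted k v acc).find? (fun p => p.1 == k')
      = if k' = k then some (k, v) else acc.find? (fun p => p.1 == k') := by
  induction acc with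
  | nil =>
    by_cases h : k' = k
    · simp [pvInsertSorted, h]
    · simp [pvInsertSorted, h, Ne.symm h]
  | cons a t ih =>
    simp only [pvInsertSorted]
    by_cases hlt : a.1 < k
    · rw [if_pos hlt]
      by_cases h : a.1 = k'
      · have hne : k' ≠ k := fun hk => (ne_of_lt hlt) (h.trans hk)
        simp [h, hne]
      · simp [h, ih]
    · rw [if_neg hlt]
      by_cases heq : a.1 = k
      · rw [if_pos heq]
        by_cases h : k' = k
        · simp [h]
        · simp [h, Ne.symm h, heq]
      · rw [if_neg heq]
        by_cases h : k' = k
        · simp [h]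
        · simp [h, Ne.symm h]

-- lookup on B's whole fold: the last occurrence in the pair list wins
theorem find?_foldl_insertSorted (l : List (String × String))
    (acc : List (String × String)) (k : String) :
    (l.foldl (fun acc p => pvInsertSorted p.1 p.2 acc) acc).find? (fun p => p.1 == k)
      = match l.reverse.find? (fun p => p.1 == k) with
        | some q => some (k, q.2)
        | none => acc.find? (fun p => p.1 == k) := by
  induction l generalizing acc with
  | nil => rfl
  | cons a t ih =>
    simp only [List.foldl_cons, List.reverse_cons, List.find?_append]
    rw [ih]
    cases t.reverse.find? (fun p => p.1 == k) with
    | some q => simp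
    | none =>
      simp only [Option.none_or]
      by_cases hk : a.1 = k
      · subst hk; simp [List.find?, find?_insertSorted]
      · have : (a.1 == k) = false := by simp [hk]
        simp [List.find?, this, find?_insertSorted, Ne.symm hk]

-- elements of a sorted insertion: the new pair or an old one
theorem mem_insertSorted (k v : String) (acc : List (String × String))
    (x : String × String) (hx : x ∈ pvInsertSorted k v acc) :
    x = (k, v) ∨ x ∈ acc := by
  induction acc with
  | nil => simpa [pvInsertSorted] using hx
  | cons a t ih =>
    simp only [pvInsertSorted] at hx
    split_ifs at hx with hlt heq
    · rcases List.mem_cons.mp hx with rfl | hx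
      · exact Or.inr (List.mem_cons_self ..)
      · rcases ih hx with h | h
        · exact Or.inl h
        · exact Or.inr (List.mem_cons_of_mem _ h)
    · rcases List.mem_cons.mp hx with rfl | hx
      · exact Or.inl rfl
      · exact Or.inr (List.mem_cons_of_mem _ hx)
    · rcases List.mem_cons.mp hx with rfl | hx
      · exact Or.inl rfl
      · exact Or.inr hx

-- sorted insertion preserves strict key order
theorem pairwise_insertSorted (k v : String) (acc : List (String × String))
    (hs : acc.Pairwise (fun a b => a.1 < b.1)) :
    (pvInsertSorted k v acc).Pairwise (fun a b => a.1 < b.1) := by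
  induction acc with
  | nil => simp [pvInsertSorted]
  | cons a t ih =>
    rcases List.pairwise_cons.mp hs with ⟨ha, ht⟩
    simp only [pvInsertSorted]
    split_ifs with hlt heq
    · refine List.pairwise_cons.mpr ⟨?_, ih ht⟩
      intro x hx
      rcases mem_insertSorted k v t x hx with rfl | hx
      · exact hlt
      · exact ha x hx
    · refine List.pairwise_cons.mpr ⟨?_, ht⟩
      intro x hx
      have h := ha x hx
      rw [heq] at h
      exact h
    · have hgt : k < a.1 := lt_of_le_of_ne (not_lt.mp hlt) (fun h => heq h.symm)
      refine List.pairwise_cons.mpr ⟨?_, hs⟩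
      intro x hx
      rcases List.mem_cons.mp hx with rfl | hx
      · exact hgt
      · exact lt_trans hgt (ha x hx)

-- in a strictly key-sorted list, membership is first-match lookup
theorem mem_iff_find?_of_pairwise (l : List (String × String)) (p : String × String)
    (hs : l.Pairwise (fun a b => a.1 < b.1)) :
    p ∈ l ↔ l.find? (fun q => q.1 == p.1) = some p := by
  constructor
  · intro hp
    induction l with
    | nil => simp at hp
    | cons a t ih =>
      rcases List.pairwise_cons.mp hs with ⟨ha, ht⟩
      rcases List.mem_cons.mp hp with rfl | hp
      · simp [List.find?]
      · have hne : a.1 ≠ p.1 := ne_of_lt (ha p hp)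
        have : (a.1 == p.1) = false := by simp [hne]
        simp only [List.find?, this]
        exact ih ht hp
  · intro h
    exact List.mem_of_find?_eq_some h

-- last-occurrence characterisation of a dict built by a fold of inserts
theorem get?_foldl_insert (l : List (String × String)) (d : PySem.Dict String String)
    (k : String) :
    (l.foldl (fun acc p => acc.insert p.1 p.2) d).get? k
      = match l.reverse.find? (fun p => p.1 == k) with
        | some q => some q.2
        | none => d.get? k := by
  induction l generalizing d with
  | nil => rfl
  | cons a t ih =>
    simp only [List.foldl_cons, List.reverse_cons, List.find?_append]
    rw [ih]
    cases t.reverse.find? (fun p => p.1 == k) with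
    | some q => simp
    | none =>
      simp only [Option.none_or]
      by_cases hk : a.1 = k
      · subst hk; simp [PySem.Dict.get?_insert_self, List.find?]
      · have : (a.1 == k) = false := by simp [hk]
        simp [List.find?, this, PySem.Dict.get?_insert_of_ne _ _ (fun h => hk h.symm)]

theorem get?_ofList (l : List (String × String)) (k : String) :
    (PySem.Dict.ofList l).get? k
      = match l.reverse.find? (fun p => p.1 == k) with
        | some q => some q.2
        | none => none := by
  exact get?_foldl_insert l PySem.Dict.empty k

-- stability of insertion into a key-sorted list: the class of any key gains x at its end
theorem filter_insertBy (x : String × String) (acc : List (String × String)) (k : String)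
    (hs : acc.Pairwise (fun a b => a.1 ≤ b.1)) :
    (PySem.List.insertBy (fun a b => decide (a.1 < b.1)) x acc).filter (fun p => p.1 == k)
      = if x.1 == k then acc.filter (fun p => p.1 == k) ++ [x]
        else acc.filter (fun p => p.1 == k) := by
  induction acc with
  | nil =>
    simp only [PySem.List.insertBy, List.filter_nil]
    by_cases hxk : x.1 = k
    · have hb1 : (x.1 == k) = true := by simp [hxk]
      simp [List.filter, hb1]
    · have hb1 : (x.1 == k) = false := by simp [hxk]
      simp [List.filter, hb1]
  | cons y ys ih =>
    rw [PySem.List.insertBy]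
    by_cases hb : x.1 < y.1
    · simp only [hb, decide_true, if_pos]
      by_cases hxk : x.1 = k
      · have hnil : (y :: ys).filter (fun p => p.1 == k) = [] := by
          rw [List.filter_eq_nil_iff]
          intro z hz
          have hyz : y.1 ≤ z.1 := by
            rcases List.mem_cons.mp hz with rfl | hz'
            · exact le_refl _
            · exact (List.pairwise_cons.mp hs).1 z hz'
          have hlt : x.1 < z.1 := lt_of_lt_of_le hb hyz
          simp only [beq_iff_eq]
          intro h; rw [h, ← hxk] at hlt; exact lt_irrefl _ hlt
        simp [hxk, hnil]
      · simp [List.filter_cons, hxk]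
    · have hb' : decide (x.1 < y.1) = false := by simp [hb]
      simp only [hb']
      rw [if_neg (by simp)]
      rw [List.filter_cons, List.filter_cons, ih (List.pairwise_cons.mp hs).2]
      by_cases hxk : x.1 = k <;> by_cases hyk : y.1 = k <;> simp [hxk, hyk]

-- the fold of insertBy (A's sort) preserves every key class in order
theorem filter_foldl_insertBy (l acc : List (String × String)) (k : String)
    (hs : acc.Pairwise (fun a b => a.1 ≤ b.1)) :
    (l.foldl (fun acc x => PySem.List.insertBy (fun a b => decide (a.1 < b.1)) x acc) acc).filter
        (fun p => p.1 == k)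
      = acc.filter (fun p => p.1 == k) ++ l.filter (fun p => p.1 == k) := by
  induction l generalizing acc with
  | nil => simp
  | cons a t ih =>
    simp only [List.foldl_cons]
    rw [ih _ (PySem.List.insertBy_pairwise_le (fun p => p.1) a acc hs),
      filter_insertBy a acc k hs, List.filter_cons]
    by_cases hak : a.1 = k <;> simp [hak]

theorem filter_sorted (l : List (String × String)) (k : String) :
    (PySem.List.sorted l (fun p => p.1)).filter (fun p => p.1 == k)
      = l.filter (fun p => p.1 == k) := by
  rw [PySem.List.sorted_eq_foldl_insertBy]
  simpa using filter_foldl_insertBy l [] k (List.Pairwise.nil)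

-- hence A's dict (built from the sorted pairs) looks up the last occurrence in the RAW list
theorem get?_ofList_sorted (l : List (String × String)) (k : String) :
    (PySem.Dict.ofList (PySem.List.sorted l (fun p => p.1))).get? k
      = (PySem.Dict.ofList l).get? k := by
  rw [get?_ofList, get?_ofList]
  have : (PySem.List.sorted l (fun p => p.1)).reverse.find? (fun p => p.1 == k)
      = l.reverse.find? (fun p => p.1 == k) := by
    rw [← List.head?_filter, ← List.head?_filter, List.filter_reverse, List.filter_reverse,
      filter_sorted]
  rw [this]

-- membership in a dict's items, given nodup keys
theorem mem_items_iff_get? (d : PySem.Dict String String) (p : String × String)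
    (hnd : d.keys.Nodup) : p ∈ d.items ↔ d.get? p.1 = some p.2 := by
  constructor
  · intro hp
    rcases hq : d.items.find? (fun q => q.1 == p.1) with _ | q
    · rw [List.find?_eq_none] at hq
      exact absurd (by simp : (p.1 == p.1) = true) (hq p hp)
    · have hqmem := List.mem_of_find?_eq_some hq
      have hqk : q.1 = p.1 := by simpa using List.find?_some hq
      have : q = p := by
        have := List.inj_on_of_nodup_map (by simpa [PySem.Dict.keys] using hnd)
        exact this hqmem hp hqk
      simp [PySem.Dict.get?, hq, this]
  · intro hp
    simp only [PySem.Dict.get?] at hp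
    rcases hq : d.items.find? (fun q => q.1 == p.1) with _ | q
    · simp [hq] at hp
    · have hqmem := List.mem_of_find?_eq_some hq
      have hqk : q.1 = p.1 := by simpa using List.find?_some hq
      have hqv : q.2 = p.2 := by simp [hq] at hp; exact hp
      have : q = p := Prod.ext hqk hqv
      exact this ▸ hqmem

-- keys of a fold of inserts over a key-sorted pair list are strictly increasing
theorem keys_pairwise_foldl (l : List (String × String)) (d : PySem.Dict String String)
    (hl : l.Pairwise (fun a b => a.1 ≤ b.1))
    (hd : d.keys.Pairwise (· < ·))
    (hb : ∀ k ∈ d.keys, ∀ q ∈ l, k ≤ q.1) :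
    (l.foldl (fun acc p => acc.insert p.1 p.2) d).keys.Pairwise (· < ·) := by
  induction l generalizing d with
  | nil => exact hd
  | cons a t ih =>
    simp only [List.foldl_cons]
    rcases List.pairwise_cons.mp hl with ⟨ha, ht⟩
    by_cases hc : d.contains a.1 = true
    · refine ih _ ht ?_ ?_
      · rw [PySem.Dict.keys_insert_of_contains d a.2 hc]; exact hd
      · rw [PySem.Dict.keys_insert_of_contains d a.2 hc]
        exact fun k hk q hq => hb k hk q (List.mem_cons_of_mem _ hq)
    · have hc' : d.contains a.1 = false := by simpa using hc
      refine ih _ ht ?_ ?_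
      · rw [PySem.Dict.keys_insert_of_not_contains d a.2 hc']
        rw [List.pairwise_append]
        refine ⟨hd, List.pairwise_singleton _ _, ?_⟩
        intro k hk k' hk'
        rcases List.mem_singleton.mp hk' with rfl
        have hle : k ≤ a.1 := hb k hk a (List.mem_cons_self ..)
        rcases lt_or_eq_of_le hle with h | h
        · exact h
        · exact absurd ((PySem.Dict.contains_iff_mem_keys d a.1).mpr (h ▸ hk)) (by simp [hc'])
      · rw [PySem.Dict.keys_insert_of_not_contains d a.2 hc']
        intro k hk q hq
        rcases List.mem_append.mp hk with hk | hk
        · exact hb k hk q (List.mem_cons_of_mem _ hq)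
        · rcases List.mem_singleton.mp hk with rfl
          exact ha q hq

theorem items_pairwise_ofList_sorted (l : List (String × String)) :
    (PySem.Dict.ofList (PySem.List.sorted l (fun p => p.1))).items.Pairwise
      (fun a b => a.1 < b.1) := by
  have h := keys_pairwise_foldl (PySem.List.sorted l (fun p => p.1)) PySem.Dict.empty
    (PySem.List.sorted_pairwise l (fun p => p.1)) (List.Pairwise.nil)
    (by intro k hk; simp [PySem.Dict.empty, PySem.Dict.keys] at hk)
  rw [PySem.Dict.keys, List.pairwise_map] at h
  exact h

-- the central identity: B's online sorted insertion produces exactly A's dict items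
theorem foldl_insertSorted_eq_items (l : List (String × String)) :
    l.foldl (fun acc p => pvInsertSorted p.1 p.2 acc) []
      = (PySem.Dict.ofList (PySem.List.sorted l (fun p => p.1))).items := by
  have hpB : (l.foldl (fun acc p => pvInsertSorted p.1 p.2 acc) []).Pairwise
      (fun a b => a.1 < b.1) := by
    have : ∀ (l : List (String × String)) (acc : List (String × String)),
        acc.Pairwise (fun a b => a.1 < b.1) →
        (l.foldl (fun acc p => pvInsertSorted p.1 p.2 acc) acc).Pairwise
          (fun a b => a.1 < b.1) := by
      intro l
      induction l with
      | nil => exact fun acc h => h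
      | cons a t ih =>
        intro acc hacc
        exact ih _ (pairwise_insertSorted a.1 a.2 acc hacc)
    exact this l [] List.Pairwise.nil
  have hpA := items_pairwise_ofList_sorted l
  -- same membership on both sides
  have hmem : ∀ p, p ∈ l.foldl (fun acc p => pvInsertSorted p.1 p.2 acc) [] ↔
      p ∈ (PySem.Dict.ofList (PySem.List.sorted l (fun p => p.1))).items := by
    intro p
    rw [mem_iff_find?_of_pairwise _ p hpB,
      mem_items_iff_get? _ p (by
        simp only [PySem.Dict.keys]
        exact (List.pairwise_map.mpr hpA).imp ne_of_lt),
      get?_ofList_sorted, get?_ofList, find?_foldl_insertSorted]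
    cases hq : l.reverse.find? (fun q => q.1 == p.1) with
    | none => simp [List.find?]
    | some q =>
      constructor
      · intro h
        injection h with h'
        show some q.2 = some p.2
        rw [← h']
      · intro h
        injection h with h'
        show some (p.1, q.2) = some p
        rw [h']
  -- two strictly key-sorted lists with equal membership are equal
  have hnB : (l.foldl (fun acc p => pvInsertSorted p.1 p.2 acc) []).Nodup :=
    hpB.imp (fun h => ne_of_apply_ne Prod.fst (ne_of_lt h))
  have hnA : (PySem.Dict.ofList (PySem.List.sorted l (fun p => p.1))).items.Nodup :=
    hpA.imp (fun h => ne_of_apply_ne Prod.fst (ne_of_lt h))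
  have hperm := (List.perm_ext_iff_of_nodup hnB hnA).mpr hmem
  exact hperm.eq_of_pairwise
    (fun a b _ _ h1 h2 => absurd (lt_trans h1 h2) (lt_irrefl _)) hpB hpA

-- ===== VERDICT (by name: the statement is the Claim_ definition above) =====
theorem sortCSVString_spec : Claim_equal_sortCSVString := by
  intro s _ hpre
  unfold Spec_sortCSVString sortCSVString sortCSVString_alt
  by_cases hs : s = ""
  · simp [hs]
  · rcases hpre with rfl | hpre
    · exact absurd rfl hs
    simp only [hs, if_false]
    rw [foldl_match_eq_foldl_insertSorted _ _ hpre, foldl_insertSorted_eq_items,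
      PySem.List.foldl_append_singleton_eq_map (fun kv : String × String => kv.1 ++ "=" ++ kv.2) _ []]
    simp
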